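-- pv_equiv track=rewrite | github.com/joannewolf/code_problems | Code_Jam/Code_Jam_2019-1A-3.py | find_new_lcp
-- ===== SOURCE A (Python) =====
-- def find_new_lcp(str1, str2, ryhme_set):
--     result = ""
--     for i in range(min(len(str1), len(str2))):
--         if (str1[i] == str2[i] and result + str1[i] not in ryhme_set):
--             result += str1[i]
--         else:
--             break
--     return result
-- ===== SOURCE B (Python) =====
-- def find_new_lcp(str1, str2, ryhme_set):
--     # Phase 1: plain longest common prefix of str1 and str2 (ignores the set).
--     p = []
--     for a, b in zip(str1, str2):
--         if a != b:
--             break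
--         p.append(a)
--     p = "".join(p)
--     # Phase 2: cut just before the first prefix of p that lies in ryhme_set.
--     for i in range(1, len(p) + 1):
--         if p[:i] in ryhme_set:
--             return p[:i - 1]
--     return p
-- ===== Notes on version B (the rewrite author's own statement) =====
-- stated objective: alternative
-- what changed: A fuses character-matching and set-membership in one break loop; B first computes the plain longest common prefix in one pass, then in a second index pass returns p[:i-1] at the first prefix p[:i] found in ryhme_set.
import Mathlib
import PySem

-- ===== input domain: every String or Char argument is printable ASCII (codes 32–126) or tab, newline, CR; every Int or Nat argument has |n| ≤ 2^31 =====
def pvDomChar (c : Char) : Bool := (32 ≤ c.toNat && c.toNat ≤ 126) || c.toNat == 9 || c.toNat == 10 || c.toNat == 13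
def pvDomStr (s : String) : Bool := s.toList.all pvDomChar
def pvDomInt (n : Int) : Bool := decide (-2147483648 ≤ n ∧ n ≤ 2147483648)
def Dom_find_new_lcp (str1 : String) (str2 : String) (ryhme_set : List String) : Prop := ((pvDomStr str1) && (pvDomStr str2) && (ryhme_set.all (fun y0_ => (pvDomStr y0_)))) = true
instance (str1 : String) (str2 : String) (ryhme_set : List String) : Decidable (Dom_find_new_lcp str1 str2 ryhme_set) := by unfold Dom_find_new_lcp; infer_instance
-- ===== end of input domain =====

-- B splits A's fused character loop into two passes — plain LCP, then a cut at the
-- first prefix found in the set (objective: alternative decomposition, same cost).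

-- ===== PORT A =====
-- A's single loop over i < min(len,len): walk both strings together, extending the
-- accumulator while the characters match and the extended prefix is not in the set.
def pvALoop (rs : List String) : List Char → List Char → List Char → List Char
  | acc, c1 :: t1, c2 :: t2 =>
      if c1 == c2 && !(rs.contains (String.mk (acc ++ [c1]))) then
        pvALoop rs (acc ++ [c1]) t1 t2
      else acc
  | acc, _, _ => acc

def find_new_lcp (str1 : String) (str2 : String) (ryhme_set : List String) : String :=
  String.mk (pvALoop ryhme_set [] str1.toList str2.toList)

-- ===== PORT B =====
-- Phase 1 of Source B: plain longest common prefix, breaking only on mismatch.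
def pvLcp : List Char → List Char → List Char
  | a :: t1, b :: t2 => if a == b then a :: pvLcp t1 t2 else []
  | _, _ => []

-- Phase 2 of Source B: for i in range(1, len(p)+1), return p[:i-1] at the first
-- p[:i] in ryhme_set (p[:i] with i ≥ 0 is exactly List.take i).
def pvBScan (p : List Char) (rs : List String) : List Nat → String
  | [] => String.mk p
  | i :: t =>
      if rs.contains (String.mk (p.take i)) then String.mk (p.take (i - 1))
      else pvBScan p rs t

def find_new_lcp_alt (str1 : String) (str2 : String) (ryhme_set : List String) : String :=
  let p := pvLcp str1.toList str2.toList
  pvBScan p ryhme_set (List.range' 1 p.length)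

-- ===== PRECONDITION & SPEC =====
def Spec_find_new_lcp (str1 : String) (str2 : String) (ryhme_set : List String) (out : String) : Prop := out = find_new_lcp_alt str1 str2 ryhme_set
instance (str1 : String) (str2 : String) (ryhme_set : List String) (out : String) : Decidable (Spec_find_new_lcp str1 str2 ryhme_set out) := by unfold Spec_find_new_lcp; infer_instance

-- ===== CLAIM (what is proved, stated in full; the proofs are below) =====
def Claim_equal_find_new_lcp : Prop := ∀ (str1 : String) (str2 : String) (ryhme_set : List String), Dom_find_new_lcp str1 str2 ryhme_set → Spec_find_new_lcp str1 str2 ryhme_set (find_new_lcp str1 str2 ryhme_set)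

-- ===== LEMMAS AND PROOFS =====

-- Canonical middle form: walk the prefix list, stopping just before the first
-- accumulated prefix that lies in rs.
def pvScanPre (rs : List String) : List Char → List Char → List Char
  | acc, [] => acc
  | acc, c :: t =>
      if rs.contains (String.mk (acc ++ [c])) then acc
      else pvScanPre rs (acc ++ [c]) t

theorem pvALoop_eq_scanPre (rs : List String) :
    ∀ (l1 l2 acc : List Char), pvALoop rs acc l1 l2 = pvScanPre rs acc (pvLcp l1 l2) := by
  intro l1
  induction l1 with
  | nil => intro l2 acc; cases l2 <;> simp [pvALoop, pvLcp, pvScanPre]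
  | cons c1 t1 ih =>
    intro l2 acc
    cases l2 with
    | nil => simp [pvALoop, pvLcp, pvScanPre]
    | cons c2 t2 =>
      by_cases h : c1 = c2
      · subst h
        by_cases hm : String.mk (acc ++ [c1]) ∈ rs
        · simp [pvALoop, pvLcp, pvScanPre, hm]
        · simp [pvALoop, pvLcp, pvScanPre, hm, ih]
      · simp [pvALoop, pvLcp, pvScanPre, h]

theorem pvBScan_eq_scanPre (rs : List String) :
    ∀ (rest acc : List Char),
      pvBScan (acc ++ rest) rs (List.range' (acc.length + 1) rest.length) =
        String.mk (pvScanPre rs acc rest) := by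
  intro rest
  induction rest with
  | nil => intro acc; simp [pvBScan, pvScanPre]
  | cons c t ih =>
    intro acc
    have htake1 : (acc ++ c :: t).take (acc.length + 1) = acc ++ [c] := by
      simp [List.take_append]
    have htake0 : (acc ++ c :: t).take (acc.length + 1 - 1) = acc := by
      simp [List.take_append]
    by_cases hm : String.mk (acc ++ [c]) ∈ rs
    · simp [pvBScan, List.range'_succ, htake1, htake0, hm, pvScanPre]
    · have := ih (acc ++ [c])
      simp only [List.append_assoc, List.singleton_append, List.length_append,
        List.length_cons, List.length_nil] at this
      simpa [pvBScan, List.range'_succ, htake1, hm, pvScanPre, Nat.add_assoc,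
        Nat.add_comm 1 1] using this

-- ===== VERDICT (by name: the statement is the Claim_ definition above) =====
theorem find_new_lcp_spec : Claim_equal_find_new_lcp := by
  intro str1 str2 ryhme_set _
  show find_new_lcp str1 str2 ryhme_set = find_new_lcp_alt str1 str2 ryhme_set
  unfold find_new_lcp find_new_lcp_alt
  rw [pvALoop_eq_scanPre]
  have := pvBScan_eq_scanPre ryhme_set (pvLcp str1.toList str2.toList) []
  simpa using this.symm
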